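-- pv_equiv track=rewrite | github.com/shubhangv68/nurikabe-solver | Code/Solvers/inference.py | starting_1
-- ===== SOURCE A (Python) =====
-- def check_in_board(board, point):
--     """
--     Checks if the given point is within the bounds of the board.
--
--     Params:
--         - board: Takes in a Nurikabe board state of x by y shape
--         - point: Coordinates of a point
--
--     Returns:
--         - True: If the point is within the bounds of the board
--         - False: If the point is not within the bounds of the board
--     """
--     if point[0] >= 0 and point[1] >= 0 and point[0] < len(board) and point[1] < len(board[0]):
--         return True
--     return False
--
-- def get_neighbors(board, point_row, point_col):
--     """
--     Obtains the 4 neighbors surrounding the given point's coordinates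
--     Only up, down, left, right neighbors. Diagonals not included.
--
--     Params:
--         - point_row: Row of the point
--         - point_col: Column of the point
--
--     Returns:
--         - Array: Returns the coordinates of the 4 surrounding neighbors
--                  as tuples in an array
--     """
--     potential_neighbors = [(point_row, point_col+1), (point_row+1, point_col), (point_row, point_col-1), (point_row-1, point_col)]
--     neighbors = []
--     for each in potential_neighbors:
--         if check_in_board(board, each):
--             neighbors.append(each)
--     return neighbors
--
-- def starting_1(board, coordinates):
--     """
--     island of 1 -> all tiles around it are black
--     returns a lit of tuples (col , row) of the coords of black tiles
--     """
--     black_tiles = []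
--
--     for coord in coordinates:
--         if coord[2] == 1:
--             neighbors = get_neighbors(board, coord[0], coord[1])
--             for neighbor in neighbors:
--                 if (neighbor[0], neighbor[1], -1) not in black_tiles:
--                     black_tiles.append((neighbor[0], neighbor[1], -1))
--
--     return black_tiles
-- ===== SOURCE B (Python) =====
-- def check_in_board(board, point):
--     if point[0] >= 0 and point[1] >= 0 and point[0] < len(board) and point[1] < len(board[0]):
--         return True
--     return False
--
-- def get_neighbors(board, point_row, point_col):
--     potential_neighbors = [(point_row, point_col+1), (point_row+1, point_col), (point_row, point_col-1), (point_row-1, point_col)]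
--     neighbors = []
--     for each in potential_neighbors:
--         if check_in_board(board, each):
--             neighbors.append(each)
--     return neighbors
--
-- def _first_seen(xs):
--     """First-occurrence dedup by recursion: keep the head, drop its later copies."""
--     if not xs:
--         return []
--     head = xs[0]
--     return [head] + _first_seen([y for y in xs[1:] if y != head])
--
-- def starting_1(board, coordinates):
--     candidates = [(n[0], n[1], -1)
--                   for coord in coordinates if coord[2] == 1
--                   for n in get_neighbors(board, coord[0], coord[1])]
--     return _first_seen(candidates)
-- ===== Notes on version B (the rewrite author's own statement) =====
-- stated objective: alternative
-- what changed: B builds one flat duplicate-allowing candidate list with no membership test in the generation loops, then collapses it in a separate recursive first-occurrence dedup pass, instead of A's interleaved scan-and-dedup against the growing output list.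
import Mathlib
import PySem

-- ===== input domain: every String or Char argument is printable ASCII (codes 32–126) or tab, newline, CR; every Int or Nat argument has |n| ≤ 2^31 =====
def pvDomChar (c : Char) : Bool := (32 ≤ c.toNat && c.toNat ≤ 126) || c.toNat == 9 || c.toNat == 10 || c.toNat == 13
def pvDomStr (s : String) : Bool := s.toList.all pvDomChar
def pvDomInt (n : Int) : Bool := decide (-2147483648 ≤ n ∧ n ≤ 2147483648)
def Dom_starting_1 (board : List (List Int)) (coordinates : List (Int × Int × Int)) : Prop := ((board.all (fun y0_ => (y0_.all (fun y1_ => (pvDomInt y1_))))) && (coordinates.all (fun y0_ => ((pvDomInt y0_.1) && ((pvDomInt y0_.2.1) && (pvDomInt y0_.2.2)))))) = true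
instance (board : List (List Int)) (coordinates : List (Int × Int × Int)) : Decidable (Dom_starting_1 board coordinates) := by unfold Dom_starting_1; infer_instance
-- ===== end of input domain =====

-- B replaces A's interleaved scan-and-dedup with a flat candidate list plus a separate
-- recursive first-occurrence dedup pass (objective: alternative decomposition, same cost).

-- ===== PORT A =====
-- `board[0]` is only reached by Python when the conjunct `point[0] < len(board)` already
-- guaranteed board ≠ []; headD's default is therefore never the deciding value (exact).
def check_in_board (board : List (List Int)) (point : Int × Int) : Bool :=
  if 0 ≤ point.1 ∧ 0 ≤ point.2 ∧ point.1 < (board.length : Int) ∧ point.2 < ((board.headD []).length : Int) then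
    true
  else
    false

def get_neighbors (board : List (List Int)) (point_row point_col : Int) : List (Int × Int) :=
  [(point_row, point_col+1), (point_row+1, point_col), (point_row, point_col-1), (point_row-1, point_col)].foldl
    (fun neighbors each => if check_in_board board each then neighbors ++ [each] else neighbors) []

def starting_1 (board : List (List Int)) (coordinates : List (Int × Int × Int)) : List (Int × Int × Int) :=
  coordinates.foldl
    (fun black_tiles coord =>
      if coord.2.2 = 1 then
        (get_neighbors board coord.1 coord.2.1).foldl
          (fun bt neighbor =>
            if (neighbor.1, neighbor.2, (-1 : Int)) ∈ bt then bt
            else bt ++ [(neighbor.1, neighbor.2, (-1 : Int))]) black_tiles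
      else black_tiles) []

-- ===== PORT B =====
-- first-occurrence dedup by recursion: keep the head, drop its later copies
def firstSeen (xs : List (Int × Int × Int)) : List (Int × Int × Int) :=
  match xs with
  | [] => []
  | head :: rest => head :: firstSeen (rest.filter (fun y => y ≠ head))
termination_by xs.length
decreasing_by
  simp only [List.length_cons, List.length_unattach]
  exact Nat.lt_succ_of_le (le_trans (List.length_filter_le _ _) (by simp))

def starting_1_alt (board : List (List Int)) (coordinates : List (Int × Int × Int)) : List (Int × Int × Int) :=
  firstSeen (coordinates.flatMap (fun coord =>
    if coord.2.2 = 1 then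
      (get_neighbors board coord.1 coord.2.1).map (fun n => (n.1, n.2, (-1 : Int)))
    else []))

-- ===== PRECONDITION & SPEC =====
def Spec_starting_1 (board : List (List Int)) (coordinates : List (Int × Int × Int)) (out : List (Int × Int × Int)) : Prop := out = starting_1_alt board coordinates
instance (board : List (List Int)) (coordinates : List (Int × Int × Int)) (out : List (Int × Int × Int)) : Decidable (Spec_starting_1 board coordinates out) := by unfold Spec_starting_1; infer_instance

-- ===== CLAIM (what is proved, stated in full; the proofs are below) =====
def Claim_equal_starting_1 : Prop := ∀ (board : List (List Int)) (coordinates : List (Int × Int × Int)), Dom_starting_1 board coordinates → Spec_starting_1 board coordinates (starting_1 board coordinates)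

-- ===== LEMMAS AND PROOFS =====

theorem firstSeen_cons (x : Int × Int × Int) (rest : List (Int × Int × Int)) :
    firstSeen (x :: rest) = x :: firstSeen (rest.filter (fun y => y ≠ x)) := by
  rw [firstSeen.eq_def]

-- A's duplicate-avoiding append, abstracted as a fold over an arbitrary element list
def insAll (acc l : List (Int × Int × Int)) : List (Int × Int × Int) :=
  l.foldl (fun a x => if x ∈ a then a else a ++ [x]) acc

theorem insAll_append (acc l1 l2 : List (Int × Int × Int)) :
    insAll acc (l1 ++ l2) = insAll (insAll acc l1) l2 := by
  simp [insAll, List.foldl_append]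

-- A's nested loops compute insAll of the flat candidate list
theorem starting_1_eq_insAll (board : List (List Int)) :
    ∀ (coordinates : List (Int × Int × Int)) (acc : List (Int × Int × Int)),
      coordinates.foldl
        (fun black_tiles coord =>
          if coord.2.2 = 1 then
            (get_neighbors board coord.1 coord.2.1).foldl
              (fun bt neighbor =>
                if (neighbor.1, neighbor.2, (-1 : Int)) ∈ bt then bt
                else bt ++ [(neighbor.1, neighbor.2, (-1 : Int))]) black_tiles
          else black_tiles) acc
      = insAll acc (coordinates.flatMap (fun coord =>
          if coord.2.2 = 1 then
            (get_neighbors board coord.1 coord.2.1).map (fun n => (n.1, n.2, (-1 : Int)))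
          else []))
  | [], acc => by simp [insAll]
  | c :: cs, acc => by
    rw [List.foldl_cons, List.flatMap_cons, insAll_append, starting_1_eq_insAll board cs]
    congr 1
    by_cases h : c.2.2 = 1
    · simp [h, insAll, List.foldl_map]
    · simp [h, insAll]

theorem insAll_eq_firstSeen : ∀ (l acc : List (Int × Int × Int)),
    insAll acc l = acc ++ firstSeen (l.filter (fun y => y ∉ acc))
  | [], acc => by simp [insAll, firstSeen]
  | x :: xs, acc => by
    simp only [insAll, List.foldl_cons]
    by_cases hx : x ∈ acc
    · have := insAll_eq_firstSeen xs acc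
      simp only [insAll] at this
      rw [if_pos hx, this, List.filter_cons]
      simp [hx]
    · have := insAll_eq_firstSeen xs (acc ++ [x])
      simp only [insAll] at this
      rw [if_neg hx, this, List.filter_cons]
      simp only [hx, decide_not, not_false_eq_true, decide_true, if_true, List.append_assoc,
        List.singleton_append]
      rw [firstSeen_cons]
      congr 2
      rw [List.filter_filter]
      congr 1
      apply List.filter_congr
      intro y _
      by_cases h1 : y = x <;> by_cases h2 : y ∈ acc <;> simp [h1, h2]
  termination_by l _ => l.length
  decreasing_by all_goals simp

-- ===== VERDICT (by name: the statement is the Claim_ definition above) =====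
theorem starting_1_spec : Claim_equal_starting_1 := by
  intro board coordinates _
  unfold Spec_starting_1 starting_1 starting_1_alt
  rw [starting_1_eq_insAll board, insAll_eq_firstSeen]
  simp
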